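-- pv_equiv track=rewrite | github.com/hojp7874/Algorithm-format | Problem/Programmers/LV2/뉴스_클러스터링.py | set_maker
-- ===== SOURCE A (Python) =====
-- def set_maker(s):
--     ret = set()
--     for i in range(1, len(s)):
--         if (el := s[i-1:i+1].lower()).isalpha():
--             num = 1
--             while el + str(num) in ret:
--                 num += 1
--             ret.add(el + str(num))
--     return ret
-- ===== SOURCE B (Python) =====
-- def set_maker(s):
--     # Two-phase: collect the lowered bigrams first, then number each
--     # alphabetic bigram by a running per-bigram count (no rescan of the set).
--     grams = [s[i - 1:i + 1].lower() for i in range(1, len(s))]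
--     seen = {}
--     out = []
--     for g in grams:
--         if g.isalpha():
--             c = seen.get(g, 0) + 1
--             seen[g] = c
--             out.append(g + str(c))
--     return set(out)
-- ===== Notes on version B (the rewrite author's own statement) =====
-- stated objective: faster
-- what changed: A numbers each alphabetic bigram by probing the result set for the first free suffix (an inner rescan per bigram); B is two-phase: it first extracts all lowered bigrams with a comprehension and then makes one pass with a running per-bigram count dictionary, emitting bigram+str(count) directly with no inner search.
import Mathlib
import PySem

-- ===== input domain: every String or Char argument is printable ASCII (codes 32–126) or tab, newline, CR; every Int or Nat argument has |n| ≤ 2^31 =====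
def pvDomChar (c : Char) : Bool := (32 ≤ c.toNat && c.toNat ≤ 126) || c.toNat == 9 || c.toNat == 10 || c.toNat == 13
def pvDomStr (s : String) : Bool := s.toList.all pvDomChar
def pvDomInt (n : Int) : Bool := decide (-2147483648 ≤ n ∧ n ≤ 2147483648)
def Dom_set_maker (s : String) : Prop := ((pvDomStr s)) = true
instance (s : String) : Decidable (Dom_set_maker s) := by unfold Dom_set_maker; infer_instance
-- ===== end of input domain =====

-- B replaces A's inner rescan of the result set for a free numeric suffix by a
-- two-phase pass (bigram extraction, then a running per-bigram count dictionary);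
-- objective: faster (no inner search per bigram).


-- ===== PORT A =====
-- the 'while el + str(num) in ret: num += 1' loop; fuel is only a termination
-- guard (ret.length + 2 membership probes always suffice to reach a free suffix)
def pvFindFree (el : String) (ret : PySem.Set String) : Nat → Int → Int
  | 0, num => num
  | fuel + 1, num =>
    if PySem.Set.contains ret (el ++ PySem.Int.toStr num) then
      pvFindFree el ret fuel (num + 1)
    else num

def set_maker (s : String) : List String :=
  (PySem.List.pyRange 1 (PySem.Str.len s) 1).foldl
    (fun ret i =>
      let el := PySem.Str.lower (PySem.Str.slice s (some (i - 1)) (some (i + 1)))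
      if PySem.Str.strIsalpha el then
        PySem.Set.add ret (el ++ PySem.Int.toStr (pvFindFree el ret (ret.length + 2) 1))
      else ret)
    PySem.Set.empty

-- ===== PORT B =====
def set_maker_alt (s : String) : List String :=
  let grams := (PySem.List.pyRange 1 (PySem.Str.len s) 1).map
    (fun i => PySem.Str.lower (PySem.Str.slice s (some (i - 1)) (some (i + 1))))
  let fin := grams.foldl
    (fun (st : PySem.Dict String Int × List String) g =>
      if PySem.Str.strIsalpha g then
        let c := st.1.getD g 0 + 1
        (st.1.insert g c, st.2 ++ [g ++ PySem.Int.toStr c])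
      else st)
    (PySem.Dict.empty, [])
  PySem.Set.ofList fin.2

-- ===== PRECONDITION & SPEC =====
def Spec_set_maker (s : String) (out : List String) : Prop := out = set_maker_alt s
instance (s : String) (out : List String) : Decidable (Spec_set_maker s out) := by unfold Spec_set_maker; infer_instance

-- ===== CLAIM (what is proved, stated in full; the proofs are below) =====
def Claim_equal_set_maker : Prop := ∀ (s : String), Dom_set_maker s → Spec_set_maker s (set_maker s)

-- ===== LEMMAS AND PROOFS =====

-- the lowered bigram at index i
def pvGram (s : String) (i : Int) : String :=
  PySem.Str.lower (PySem.Str.slice s (some (i - 1)) (some (i + 1)))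

def pvStepA (ret : List String) (g : String) : List String :=
  if PySem.Str.strIsalpha g then
    PySem.Set.add ret (g ++ PySem.Int.toStr (pvFindFree g ret (ret.length + 2) 1))
  else ret

def pvStepB (st : PySem.Dict String Int × List String) (g : String) :
    PySem.Dict String Int × List String :=
  if PySem.Str.strIsalpha g then
    (st.1.insert g (st.1.getD g 0 + 1), st.2 ++ [g ++ PySem.Int.toStr (st.1.getD g 0 + 1)])
  else st

lemma set_maker_eq_fold (s : String) :
    set_maker s =
      ((PySem.List.pyRange 1 (PySem.Str.len s) 1).map (pvGram s)).foldl pvStepA [] := by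
  simp only [List.foldl_map]; rfl

lemma set_maker_alt_eq_fold (s : String) :
    set_maker_alt s =
      PySem.Set.ofList
        (((PySem.List.pyRange 1 (PySem.Str.len s) 1).map (pvGram s)).foldl pvStepB
          (PySem.Dict.empty, [])).2 := by
  rfl

-- ---- injectivity of str(n) on positive ints ----

lemma pv_toDigitsCore_acc (f : Nat) : ∀ (n : Nat) (acc : List Char),
    Nat.toDigitsCore 10 f n acc = Nat.toDigitsCore 10 f n [] ++ acc := by
  induction f with
  | zero => intro n acc; simp [Nat.toDigitsCore]
  | succ f ih =>
    intro n acc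
    simp only [Nat.toDigitsCore]
    by_cases h : n / 10 = 0
    · simp [h]
    · simp only [h, if_false]
      rw [ih (n / 10) ((n % 10).digitChar :: acc), ih (n / 10) [(n % 10).digitChar]]
      simp

def pvDecode (l : List Char) : Nat := l.foldl (fun a c => 10 * a + (c.toNat - 48)) 0

lemma pv_decode_append_singleton (l : List Char) (c : Char) :
    pvDecode (l ++ [c]) = 10 * pvDecode l + (c.toNat - 48) := by
  simp [pvDecode]

lemma pv_digitChar_toNat (d : Nat) (hd : d < 10) : (Nat.digitChar d).toNat - 48 = d := by
  interval_cases d <;> decide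

lemma pv_decode_toDigitsCore (f : Nat) : ∀ n : Nat, 0 < f → n < 10 ^ f →
    pvDecode (Nat.toDigitsCore 10 f n []) = n := by
  induction f with
  | zero => intro n h; omega
  | succ f ih =>
    intro n _ hn
    simp only [Nat.toDigitsCore]
    by_cases h : n / 10 = 0
    · have hn10 : n < 10 := by omega
      simp [h, pvDecode, Nat.mod_eq_of_lt hn10, pv_digitChar_toNat n hn10]
    · have hf : 0 < f := by
        rcases Nat.eq_zero_or_pos f with hf0 | hf0
        · subst hf0; simp at hn; omega
        · exact hf0
      simp only [h, if_false]
      rw [pv_toDigitsCore_acc, pv_decode_append_singleton,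
        ih (n / 10) hf (by
          have : n < 10 ^ (f + 1) := hn
          have h10 : (10:Nat) ^ (f + 1) = 10 ^ f * 10 := by ring
          omega),
        pv_digitChar_toNat (n % 10) (Nat.mod_lt n (by omega))]
      omega

lemma pv_decode_toDigits (n : Nat) : pvDecode (Nat.toDigits 10 n) = n := by
  have h1 : n < 10 ^ (n + 1) := by
    have := Nat.lt_pow_self (n := n) (a := 10) (by norm_num)
    calc n < 10 ^ n := this
    _ ≤ 10 ^ (n + 1) := Nat.pow_le_pow_right (by norm_num) (Nat.le_succ n)
  exact pv_decode_toDigitsCore (n + 1) n (Nat.succ_pos n) h1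

lemma pv_toStr_inj {a b : Int} (ha : 1 ≤ a) (hb : 1 ≤ b)
    (hl : PySem.Int.toChars a = PySem.Int.toChars b) : a = b := by
  simp only [PySem.Int.toChars, if_neg (by omega : ¬ a < 0), if_neg (by omega : ¬ b < 0)] at hl
  have := congrArg pvDecode hl
  rw [pv_decode_toDigits, pv_decode_toDigits] at this
  omega

-- decompose equality of 'g ++ str(k)' strings with equal-length g parts
lemma pv_concat_inj {g g' : String} {a b : Int} (hg : g.toList.length = g'.toList.length)
    (ha : 1 ≤ a) (hb : 1 ≤ b)
    (h : g ++ PySem.Int.toStr a = g' ++ PySem.Int.toStr b) : g = g' ∧ a = b := by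
  have hl := congrArg String.toList h
  rw [String.toList_append, String.toList_append] at hl
  have hparts := List.append_inj hl hg
  refine ⟨String.toList_inj.mp hparts.1, pv_toStr_inj ha hb ?_⟩
  have h2 := hparts.2
  rwa [PySem.Int.toList_toStr, PySem.Int.toList_toStr] at h2

-- ---- the loop invariant ----

def pvInv (ret : List String) (seen : PySem.Dict String Int) : Prop :=
  ret.Nodup ∧
  (∀ g : String, 0 ≤ seen.getD g 0) ∧
  (∀ g : String, seen.getD g 0 ≤ (ret.length : Int)) ∧
  (∀ (g : String) (k : Int), g.toList.length = 2 → 1 ≤ k →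
    ((g ++ PySem.Int.toStr k) ∈ ret ↔ k ≤ seen.getD g 0))

lemma pvFindFree_spec (el : String) (ret : List String) (c : Int) (_hc : 0 ≤ c)
    (hmem : ∀ k : Int, 1 ≤ k →
      (PySem.Set.contains ret (el ++ PySem.Int.toStr k) = true ↔ k ≤ c)) :
    ∀ (fuel : Nat) (num : Int), 1 ≤ num → num ≤ c + 1 → c + 2 ≤ (fuel : Int) + num →
      pvFindFree el ret fuel num = c + 1 := by
  intro fuel
  induction fuel with
  | zero => intro num h1 h2 h3; simp at h3; omega
  | succ f ih =>
    intro num h1 h2 h3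
    simp only [pvFindFree]
    by_cases hm : PySem.Set.contains ret (el ++ PySem.Int.toStr num) = true
    · have hle : num ≤ c := (hmem num h1).1 hm
      rw [if_pos hm]
      exact ih (num + 1) (by omega) (by omega) (by push_cast at h3 ⊢; omega)
    · have : ¬ num ≤ c := fun hle => hm ((hmem num h1).2 hle)
      rw [if_neg hm]
      omega

lemma pv_step_preserves (g : String) (ret : List String) (seen : PySem.Dict String Int)
    (hlen : PySem.Str.strIsalpha g = true → g.toList.length = 2)
    (hinv : pvInv ret seen) :
    pvStepA ret g = (pvStepB (seen, ret) g).2 ∧ pvInv (pvStepA ret g) (pvStepB (seen, ret) g).1 := by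
  obtain ⟨hnd, hpos, hbound, hmem⟩ := hinv
  by_cases ha : PySem.Str.strIsalpha g = true
  · have hg2 := hlen ha
    have hcontains : ∀ k : Int, 1 ≤ k →
        (PySem.Set.contains ret (g ++ PySem.Int.toStr k) = true ↔ k ≤ seen.getD g 0) := by
      intro k hk
      rw [← hmem g k hg2 hk]
      simp [PySem.Set.contains]
    have hff : pvFindFree g ret (ret.length + 2) 1 = seen.getD g 0 + 1 := by
      have := hbound g
      exact pvFindFree_spec g ret (seen.getD g 0) (hpos g) hcontains (ret.length + 2) 1 le_rfl
        (by have := hpos g; omega) (by push_cast; omega)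
    have hnotin : (g ++ PySem.Int.toStr (seen.getD g 0 + 1)) ∉ ret := by
      intro hin
      have := (hmem g (seen.getD g 0 + 1) hg2 (by have := hpos g; omega)).1 hin
      omega
    have hcf : PySem.Set.contains ret (g ++ PySem.Int.toStr (seen.getD g 0 + 1)) = false := by
      simp only [PySem.Set.contains, List.contains_eq_mem, decide_eq_false_iff_not]
      exact hnotin
    have hA : pvStepA ret g = ret ++ [g ++ PySem.Int.toStr (seen.getD g 0 + 1)] := by
      simp only [pvStepA, ha, if_true, hff, PySem.Set.add, hcf, Bool.false_eq_true, if_false]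
    have hB : pvStepB (seen, ret) g =
        (seen.insert g (seen.getD g 0 + 1), ret ++ [g ++ PySem.Int.toStr (seen.getD g 0 + 1)]) := by
      simp only [pvStepB, ha, if_true]
    rw [hA, hB]
    refine ⟨rfl, ?_, ?_, ?_, ?_⟩
    · exact List.Nodup.append hnd (List.nodup_singleton _)
        (by simpa [List.disjoint_singleton] using hnotin)
    · intro g'
      rw [PySem.Dict.getD_insert]
      split_ifs with he
      · have := hpos g; omega
      · exact hpos g'
    · intro g'
      rw [PySem.Dict.getD_insert]
      simp only [List.length_append, List.length_singleton]
      split_ifs with he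
      · have := hbound g; push_cast at this ⊢; omega
      · have := hbound g'; push_cast at this ⊢; omega
    · intro g' k hg'2 hk
      rw [PySem.Dict.getD_insert]
      constructor
      · intro hin
        rcases List.mem_append.1 hin with hin | hin
        · have := (hmem g' k hg'2 hk).1 hin
          split_ifs with he
          · subst he; omega
          · exact this
        · have heq : g' ++ PySem.Int.toStr k = g ++ PySem.Int.toStr (seen.getD g 0 + 1) := by
            simpa using hin
          obtain ⟨hgg, hkk⟩ := pv_concat_inj (by rw [hg'2, hg2]) hk (by have := hpos g; omega) heq
          subst hgg
          rw [if_pos rfl]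
          omega
      · intro hle
        split_ifs at hle with he
        · rcases lt_or_eq_of_le hle with hlt | heq2
          · exact List.mem_append.2 (Or.inl ((hmem g' k hg'2 hk).2 (by rw [he]; omega)))
          · rw [he, heq2]; exact List.mem_append.2 (Or.inr (by simp))
        · exact List.mem_append.2 (Or.inl ((hmem g' k hg'2 hk).2 hle))
  · have hA : pvStepA ret g = ret := by simp only [pvStepA]; rw [if_neg ha]
    have hB : pvStepB (seen, ret) g = (seen, ret) := by simp only [pvStepB]; rw [if_neg ha]
    rw [hA, hB]
    exact ⟨rfl, hnd, hpos, hbound, hmem⟩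

lemma pv_loop_eq : ∀ (gs : List String) (ret : List String) (seen : PySem.Dict String Int),
    (∀ g ∈ gs, PySem.Str.strIsalpha g = true → g.toList.length = 2) →
    pvInv ret seen →
    gs.foldl pvStepA ret = (gs.foldl pvStepB (seen, ret)).2 ∧
      pvInv (gs.foldl pvStepA ret) (gs.foldl pvStepB (seen, ret)).1 := by
  intro gs
  induction gs with
  | nil => intro ret seen _ hinv; exact ⟨rfl, hinv⟩
  | cons g gs ih =>
    intro ret seen hlen hinv
    obtain ⟨heq, hinv'⟩ := pv_step_preserves g ret seen (hlen g List.mem_cons_self) hinv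
    simp only [List.foldl_cons]
    have hstep : pvStepB (seen, ret) g = ((pvStepB (seen, ret) g).1, pvStepA ret g) := by
      rw [heq]
    rw [hstep]
    exact ih (pvStepA ret g) (pvStepB (seen, ret) g).1
      (fun g' hg' => hlen g' (List.mem_cons_of_mem g hg')) hinv'

lemma pv_ofList_nodup {l : List String} (h : l.Nodup) : PySem.Set.ofList l = l := by
  suffices H : ∀ (pre : List String), pre.Nodup → (∀ x ∈ l, x ∉ pre) → l.Nodup →
      l.foldl PySem.Set.add pre = pre ++ l by
    simpa using H [] List.nodup_nil (by simp) h
  clear h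
  induction l with
  | nil => intro pre _ _ _; simp
  | cons x xs ih =>
    intro pre hpre hdisj hnd
    simp only [List.foldl_cons]
    have hx : x ∉ pre := hdisj x List.mem_cons_self
    have hadd : PySem.Set.add pre x = pre ++ [x] := by
      have : PySem.Set.contains pre x = false := by
        simp only [PySem.Set.contains, List.contains_eq_mem, decide_eq_false_iff_not]
        exact hx
      simp only [PySem.Set.add, this, Bool.false_eq_true, if_false]
    rw [hadd, ih (pre ++ [x])
      (List.Nodup.append hpre (List.nodup_singleton _)
        (by simpa [List.disjoint_singleton] using hx))
      (by
        intro y hy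
        simp only [List.mem_append, List.mem_singleton]
        rintro (hyp | rfl)
        · exact hdisj y (List.mem_cons_of_mem x hy) hyp
        · exact (List.nodup_cons.1 hnd).1 hy)
      (List.nodup_cons.1 hnd).2]
    simp

-- every alphabetic lowered bigram has exactly two characters
lemma pv_gram_len (s : String) (i : Int) (hi : i ∈ PySem.List.pyRange 1 (PySem.Str.len s) 1) :
    (pvGram s i).toList.length = 2 := by
  rw [PySem.List.mem_pyRange_one] at hi
  obtain ⟨h1, h2⟩ := hi
  simp only [PySem.Str.len_eq] at h2
  simp only [pvGram, PySem.Str.toList_lower, PySem.Chars.lower, List.length_map,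
    PySem.Str.toList_slice, PySem.Chars.slice_eq_listSlice, PySem.List.length_slice,
    PySem.List.clampIdx]
  split_ifs <;> omega

-- ===== VERDICT (by name: the statement is the Claim_ definition above) =====
theorem set_maker_spec : Claim_equal_set_maker := by
  intro s _
  unfold Spec_set_maker
  rw [set_maker_eq_fold, set_maker_alt_eq_fold]
  have hinv0 : pvInv [] PySem.Dict.empty := by
    refine ⟨List.nodup_nil, ?_, ?_, ?_⟩
    · intro g; simp [PySem.Dict.getD_empty]
    · intro g; simp [PySem.Dict.getD_empty]
    · intro g k _ hk
      simp only [List.not_mem_nil, false_iff, PySem.Dict.getD_empty]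
      omega
  obtain ⟨heq, hinv⟩ := pv_loop_eq ((PySem.List.pyRange 1 (PySem.Str.len s) 1).map (pvGram s))
    [] PySem.Dict.empty
    (by
      intro g hg _
      obtain ⟨i, hi, rfl⟩ := List.mem_map.1 hg
      exact pv_gram_len s i hi)
    hinv0
  rw [heq, pv_ofList_nodup (heq ▸ hinv.1)]
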